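-- pv_equiv track=rewrite | github.com/raeez/chiral-bar-cobar | compute/lib/cy_sheaf_categories_engine.py | hochschild_cohomology_HKR
-- ===== SOURCE A (Python) =====
-- from typing import Dict, List, Optional, Tuple
--
-- def hochschild_cohomology_HKR(
--     hodge: Dict[Tuple[int, int], int],
--     dim: int,
--     is_CY: bool = True,
-- ) -> Dict[int, int]:
--     """Compute Hochschild cohomology via HKR decomposition.
--
--     Standard grading convention (Caldararu, Keller):
--         HH^n(X) = bigoplus_{p+q=n} H^q(X, wedge^p T_X)
--
--     For CY d-fold with omega_X = O_X:
--         wedge^p T_X = Omega^{d-p}_X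
--     so  H^q(wedge^p T_X) = H^q(Omega^{d-p}) = h^{d-p, q}.
--
--     Thus HH^n = sum_{p+q=n, 0<=p<=d} h^{d-p, q}.
--
--     This is the STANDARD convention for deformation theory:
--         HH^0 = endomorphisms
--         HH^1 = infinitesimal automorphisms
--         HH^2 = first-order deformations
--         HH^3 = obstructions
--     """
--     if not is_CY:
--         raise NotImplementedError("Non-CY HKR requires explicit polyvector data")
--
--     hh: Dict[int, int] = {}
--     for n in range(2 * dim + 1):
--         total = 0
--         for p in range(dim + 1):
--             q = n - p
--             if q < 0 or q > dim:
--                 continue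
--             # wedge^p T = Omega^{d-p} for CY
--             omega_deg = dim - p
--             total += hodge.get((omega_deg, q), 0)
--         if total > 0:
--             hh[n] = total
--     return hh
-- ===== SOURCE B (Python) =====
-- def hochschild_cohomology_HKR(hodge, dim, is_CY=True):
--     """Single pass over the hodge dict: each entry h^{a,b} lands in HH^{dim-a+b}."""
--     if not is_CY:
--         raise NotImplementedError("Non-CY HKR requires explicit polyvector data")
--     acc = {}
--     for (a, b), v in hodge.items():
--         if 0 <= a <= dim and 0 <= b <= dim:
--             n = dim - a + b
--             acc[n] = acc.get(n, 0) + v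
--     return {n: acc[n] for n in sorted(acc) if acc[n] > 0}
-- ===== Notes on version B (the rewrite author's own statement) =====
-- stated objective: faster
-- what changed: A scans all n in [0,2*dim] with an inner loop over p in [0,dim] doing a dict lookup per (p,q); B makes a single pass over the hodge entries, mapping each (a,b) to n=dim-a+b and accumulating into a counter, then emits the positive totals in increasing n.
import Mathlib
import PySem

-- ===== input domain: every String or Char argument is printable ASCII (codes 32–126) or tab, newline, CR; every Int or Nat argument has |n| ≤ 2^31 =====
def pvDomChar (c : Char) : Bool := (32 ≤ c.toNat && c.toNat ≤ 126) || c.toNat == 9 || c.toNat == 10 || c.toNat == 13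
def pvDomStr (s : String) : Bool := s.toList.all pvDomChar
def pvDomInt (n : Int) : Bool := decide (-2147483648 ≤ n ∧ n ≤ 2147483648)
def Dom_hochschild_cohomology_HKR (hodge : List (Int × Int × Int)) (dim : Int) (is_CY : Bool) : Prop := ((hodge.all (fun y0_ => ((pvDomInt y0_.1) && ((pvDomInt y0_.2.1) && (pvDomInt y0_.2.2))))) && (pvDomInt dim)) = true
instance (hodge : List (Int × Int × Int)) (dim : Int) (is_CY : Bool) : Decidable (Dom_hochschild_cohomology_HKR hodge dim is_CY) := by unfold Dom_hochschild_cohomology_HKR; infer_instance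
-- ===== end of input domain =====

-- B replaces A's O(dim^2) double loop (all n, all p, one dict lookup each) by a single pass
-- over the hodge entries, mapping each (a,b) to n = dim - a + b and accumulating; objective: faster.


-- ===== PORT A =====
-- hodge : List (Int × Int × Int) encodes the Python dict {(a, b): v} as entries (a, b, v);
-- both ports view it through PySem.Dict.ofList, exactly the dict the Python function receives.
def hochschild_cohomology_HKR (hodge : List (Int × Int × Int)) (dim : Int) (is_CY : Bool) : List (Int × Int) :=
  if is_CY = false then []  -- Python: raise NotImplementedError (excluded by Pre_)
  else
    let d : PySem.Dict (Int × Int) Int :=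
      PySem.Dict.ofList (hodge.map (fun e => ((e.1, e.2.1), e.2.2)))
    let hh : PySem.Dict Int Int :=
      (PySem.List.pyRange 0 (2 * dim + 1) 1).foldl (fun hh n =>
        let total := (PySem.List.pyRange 0 (dim + 1) 1).foldl (fun total p =>
          let q := n - p
          if q < 0 ∨ q > dim then total  -- continue
          else total + d.getD (dim - p, q) 0) 0
        if total > 0 then hh.insert n total else hh) PySem.Dict.empty
    hh.items

-- ===== PORT B =====
def hochschild_cohomology_HKR_alt (hodge : List (Int × Int × Int)) (dim : Int) (is_CY : Bool) : List (Int × Int) :=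
  if is_CY = false then []  -- Python: raise NotImplementedError (excluded by Pre_)
  else
    let d : PySem.Dict (Int × Int) Int :=
      PySem.Dict.ofList (hodge.map (fun e => ((e.1, e.2.1), e.2.2)))
    -- for (a, b), v in hodge.items(): if in range, acc[dim-a+b] = acc.get(dim-a+b, 0) + v
    let acc : PySem.Dict Int Int :=
      d.items.foldl (fun acc e =>
        if 0 ≤ e.1.1 ∧ e.1.1 ≤ dim ∧ 0 ≤ e.1.2 ∧ e.1.2 ≤ dim then
          acc.insert (dim - e.1.1 + e.1.2) (acc.getD (dim - e.1.1 + e.1.2) 0 + e.2)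
        else acc) PySem.Dict.empty
    -- {n: acc[n] for n in sorted(acc) if acc[n] > 0}  (acc[n] is exact as getD: n is a key)
    ((PySem.List.sorted acc.keys (fun x => x)).foldl (fun out n =>
      if acc.getD n 0 > 0 then out.insert n (acc.getD n 0) else out)
      (PySem.Dict.empty : PySem.Dict Int Int)).items

-- ===== PRECONDITION & SPEC =====
-- Pre_ excludes only is_CY = false, where the Python A (and B) raise NotImplementedError.
def Pre_hochschild_cohomology_HKR (hodge : List (Int × Int × Int)) (dim : Int) (is_CY : Bool) : Prop :=
  is_CY = true
instance (hodge : List (Int × Int × Int)) (dim : Int) (is_CY : Bool) : Decidable (Pre_hochschild_cohomology_HKR hodge dim is_CY) := by unfold Pre_hochschild_cohomology_HKR; infer_instance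

def pvWitness_hochschild_cohomology_HKR : (List (Int × Int × Int)) × Int × Bool :=
  ([(0, 0, 1), (1, 1, 1), (0, 1, 2)], 1, true)

def Spec_hochschild_cohomology_HKR (hodge : List (Int × Int × Int)) (dim : Int) (is_CY : Bool) (out : List (Int × Int)) : Prop := out = hochschild_cohomology_HKR_alt hodge dim is_CY
instance (hodge : List (Int × Int × Int)) (dim : Int) (is_CY : Bool) (out : List (Int × Int)) : Decidable (Spec_hochschild_cohomology_HKR hodge dim is_CY out) := by unfold Spec_hochschild_cohomology_HKR; infer_instance

-- ===== CLAIM (what is proved, stated in full; the proofs are below) =====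
def Claim_equal_hochschild_cohomology_HKR : Prop := ∀ (hodge : List (Int × Int × Int)) (dim : Int) (is_CY : Bool), Dom_hochschild_cohomology_HKR hodge dim is_CY → Pre_hochschild_cohomology_HKR hodge dim is_CY → Spec_hochschild_cohomology_HKR hodge dim is_CY (hochschild_cohomology_HKR hodge dim is_CY)

-- ===== LEMMAS AND PROOFS =====

-- the contribution of one dict entry e = ((a, b), v) to HH^n
def hkContrib (dim n : Int) (e : (Int × Int) × Int) : Int :=
  if 0 ≤ e.1.1 ∧ e.1.1 ≤ dim ∧ 0 ≤ e.1.2 ∧ e.1.2 ≤ dim ∧ dim - e.1.1 + e.1.2 = n then e.2 else 0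

def hkS (dim n : Int) (l : List ((Int × Int) × Int)) : Int := (l.map (hkContrib dim n)).sum

lemma foldl_if_add (l : List Int) (c : Int → Prop) [DecidablePred c] (g : Int → Int) (t0 : Int) :
    l.foldl (fun t p => if c p then t else t + g p) t0
      = t0 + (l.map (fun p => if c p then 0 else g p)).sum := by
  induction l generalizing t0 with
  | nil => simp
  | cons x xs ih =>
    simp only [List.foldl_cons, List.map_cons, List.sum_cons, ih]
    split_ifs <;> ring

lemma sum_map_ite_single (l : List Int) (hl : l.Nodup) (p0 : Int) (w : Int → Int)
    (hw : ∀ p, p ≠ p0 → w p = 0) :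
    (l.map w).sum = if p0 ∈ l then w p0 else 0 := by
  induction l with
  | nil => simp
  | cons x xs ih =>
    simp only [List.map_cons, List.sum_cons, List.mem_cons]
    rcases List.nodup_cons.mp hl with ⟨hx, hxs⟩
    by_cases hxp : x = p0
    · subst hxp
      rw [ih hxs, if_neg (by exact fun h => hx h), if_pos (Or.inl rfl)]
      ring
    · rw [hw x hxp, ih hxs]
      by_cases hmem : p0 ∈ xs
      · simp [hmem]
      · have hno : ¬(p0 = x ∨ p0 ∈ xs) := by rintro (h | h); exacts [hxp h.symm, hmem h]
        rw [if_neg hmem, if_neg hno]; ring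

lemma getD_mk_cons (e : (Int × Int) × Int) (r : List ((Int × Int) × Int)) (k : Int × Int) :
    (PySem.Dict.mk (e :: r)).getD k 0 = if e.1 = k then e.2 else (PySem.Dict.mk r).getD k 0 := by
  rw [PySem.Dict.getD_eq_get?_getD, PySem.Dict.getD_eq_get?_getD]
  have := PySem.Dict.get?_mk_cons (κ := Int × Int) (ν := Int) e.1 e.2 r k
  simp only [beq_iff_eq] at this
  rw [this]
  split_ifs <;> rfl

lemma getD_mk_not_mem (r : List ((Int × Int) × Int)) (k : Int × Int)
    (h : k ∉ r.map (·.1)) : (PySem.Dict.mk r).getD k 0 = 0 := by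
  induction r with
  | nil => rfl
  | cons e r ih =>
    simp only [List.map_cons, List.mem_cons] at h
    push_neg at h
    rw [getD_mk_cons, if_neg (fun hh => h.1 hh.symm), ih h.2]

-- A's inner loop over p computes exactly the per-entry sum hkS
lemma innerA (dim n : Int) (l : List ((Int × Int) × Int)) (hl : (l.map (·.1)).Nodup) :
    ((PySem.List.pyRange 0 (dim + 1) 1).map
      (fun p => if n - p < 0 ∨ n - p > dim then 0 else (PySem.Dict.mk l).getD (dim - p, n - p) 0)).sum
      = hkS dim n l := by
  induction l with
  | nil =>
    have h0 : ∀ p : Int, (if n - p < 0 ∨ n - p > dim then (0 : Int)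
        else (PySem.Dict.mk ([] : List ((Int × Int) × Int))).getD (dim - p, n - p) 0) = 0 := by
      intro p; split_ifs <;> rfl
    simp only [h0, hkS, List.map_nil, List.sum_nil]
    exact List.sum_eq_zero (by intro x hx; rcases List.mem_map.mp hx with ⟨p, _, hp⟩; omega)
  | cons e r ih =>
    obtain ⟨⟨a, b⟩, v⟩ := e
    simp only [List.map_cons, List.nodup_cons] at hl
    obtain ⟨hnm, hnd⟩ := hl
    have hstep : (fun p => if n - p < 0 ∨ n - p > dim then (0 : Int)
          else (PySem.Dict.mk (((a, b), v) :: r)).getD (dim - p, n - p) 0)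
        = (fun p => (if n - p < 0 ∨ n - p > dim then (0 : Int)
            else (PySem.Dict.mk r).getD (dim - p, n - p) 0)
          + (if ¬(n - p < 0 ∨ n - p > dim) ∧ (a, b) = ((dim - p : Int), (n - p : Int)) then v else 0)) := by
      funext p
      rw [getD_mk_cons]
      by_cases hbad : n - p < 0 ∨ n - p > dim
      · rw [if_pos hbad, if_pos hbad, if_neg (fun h => h.1 hbad)]; ring
      · rw [if_neg hbad, if_neg hbad]
        by_cases hmatch : ((a : Int), (b : Int)) = ((dim - p : Int), (n - p : Int))
        · have hz : (PySem.Dict.mk r).getD (dim - p, n - p) 0 = 0 := by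
            rw [← hmatch]; exact getD_mk_not_mem r (a, b) hnm
          rw [if_pos hmatch, if_pos ⟨hbad, hmatch⟩, hz]; ring
        · rw [if_neg hmatch, if_neg (fun h => hmatch h.2)]; ring
    rw [hstep, PySem.List.sum_map_add_int, ih hnd]
    have hsingle : ((PySem.List.pyRange 0 (dim + 1) 1).map
        (fun p => if ¬(n - p < 0 ∨ n - p > dim) ∧ (a, b) = ((dim - p : Int), (n - p : Int)) then v else 0)).sum
        = hkContrib dim n ((a, b), v) := by
      rw [sum_map_ite_single _ (PySem.List.nodup_pyRange_one 0 (dim + 1)) (dim - a)]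
      · simp only [hkContrib]
        by_cases hmem : (dim - a) ∈ PySem.List.pyRange 0 (dim + 1) 1
        · rw [if_pos hmem]
          rcases PySem.List.mem_pyRange_one.mp hmem with ⟨h1, h2⟩
          by_cases hc : 0 ≤ a ∧ a ≤ dim ∧ 0 ≤ b ∧ b ≤ dim ∧ dim - a + b = n
          · rw [if_pos hc, if_pos]
            refine ⟨by omega, ?_⟩
            simp only [Prod.mk.injEq]
            constructor <;> omega
          · rw [if_neg hc, if_neg]
            intro ⟨hok, heq⟩
            simp only [Prod.mk.injEq] at heq
            exact hc (by omega)
        · rw [if_neg hmem, if_neg]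
          intro hc
          exact hmem (PySem.List.mem_pyRange_one.mpr (by omega))
      · intro p hp
        rw [if_neg]
        intro ⟨_, heq⟩
        simp only [Prod.mk.injEq] at heq
        omega
    rw [hsingle]
    simp [hkS]
    ring

-- B's accumulator realizes the same per-n sums
lemma accB_getD (dim : Int) (l : List ((Int × Int) × Int)) (acc : PySem.Dict Int Int) (n : Int) :
    (l.foldl (fun acc e =>
        if 0 ≤ e.1.1 ∧ e.1.1 ≤ dim ∧ 0 ≤ e.1.2 ∧ e.1.2 ≤ dim then
          acc.insert (dim - e.1.1 + e.1.2) (acc.getD (dim - e.1.1 + e.1.2) 0 + e.2)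
        else acc) acc).getD n 0
      = acc.getD n 0 + hkS dim n l := by
  induction l generalizing acc with
  | nil => simp [hkS]
  | cons e r ih =>
    simp only [List.foldl_cons]
    have hcontr : hkS dim n (e :: r) = hkContrib dim n e + hkS dim n r := by
      simp [hkS]
    rw [hcontr]
    by_cases hc : 0 ≤ e.1.1 ∧ e.1.1 ≤ dim ∧ 0 ≤ e.1.2 ∧ e.1.2 ≤ dim
    · rw [if_pos hc, ih, PySem.Dict.getD_insert]
      by_cases hn : n = dim - e.1.1 + e.1.2
      · rw [if_pos hn]
        simp only [hkContrib]
        rw [if_pos (by exact ⟨hc.1, hc.2.1, hc.2.2.1, hc.2.2.2, hn.symm⟩), hn]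
        ring
      · rw [if_neg hn]
        simp only [hkContrib]
        rw [if_neg (by intro h; exact hn h.2.2.2.2.symm)]
        ring
    · rw [if_neg hc, ih]
      simp only [hkContrib]
      rw [if_neg (by intro h; exact hc ⟨h.1, h.2.1, h.2.2.1, h.2.2.2.1⟩)]
      ring

lemma accB_mem_keys (dim : Int) (l : List ((Int × Int) × Int)) (acc : PySem.Dict Int Int) (n : Int) :
    (n ∈ (l.foldl (fun acc e =>
        if 0 ≤ e.1.1 ∧ e.1.1 ≤ dim ∧ 0 ≤ e.1.2 ∧ e.1.2 ≤ dim then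
          acc.insert (dim - e.1.1 + e.1.2) (acc.getD (dim - e.1.1 + e.1.2) 0 + e.2)
        else acc) acc).keys)
      ↔ (n ∈ acc.keys ∨ ∃ e ∈ l, (0 ≤ e.1.1 ∧ e.1.1 ≤ dim ∧ 0 ≤ e.1.2 ∧ e.1.2 ≤ dim)
            ∧ dim - e.1.1 + e.1.2 = n) := by
  induction l generalizing acc with
  | nil => simp
  | cons e r ih =>
    simp only [List.foldl_cons, List.mem_cons]
    by_cases hc : 0 ≤ e.1.1 ∧ e.1.1 ≤ dim ∧ 0 ≤ e.1.2 ∧ e.1.2 ≤ dim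
    · rw [if_pos hc, ih]
      simp only [PySem.Dict.mem_keys_insert]
      constructor
      · rintro (⟨h | h⟩ | ⟨x, hx, hcx, hkx⟩)
        · exact Or.inr ⟨e, Or.inl rfl, hc, h.symm⟩
        · exact Or.inl h
        · exact Or.inr ⟨x, Or.inr hx, hcx, hkx⟩
      · rintro (h | ⟨x, hx | hx, hcx, hkx⟩)
        · exact Or.inl (Or.inr h)
        · exact Or.inl (Or.inl (by rw [hx] at hkx; exact hkx.symm))
        · exact Or.inr ⟨x, hx, hcx, hkx⟩
    · rw [if_neg hc, ih]
      constructor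
      · rintro (h | ⟨x, hx, hcx, hkx⟩)
        · exact Or.inl h
        · exact Or.inr ⟨x, Or.inr hx, hcx, hkx⟩
      · rintro (h | ⟨x, hx | hx, hcx, hkx⟩)
        · exact Or.inl h
        · exact absurd (by rw [hx] at hcx; exact hcx) hc
        · exact Or.inr ⟨x, hx, hcx, hkx⟩

lemma nodup_keys_insert' (d : PySem.Dict Int Int) (k v : Int) (h : d.keys.Nodup) :
    (d.insert k v).keys.Nodup := by
  by_cases hc : d.contains k = true
  · rw [PySem.Dict.keys_insert_of_contains d v hc]; exact h
  · have hc' : d.contains k = false := by revert hc; cases d.contains k <;> simp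
    rw [PySem.Dict.keys_insert_of_not_contains d v hc']
    have hk : k ∉ d.keys := by
      rw [PySem.Dict.contains_eq_decide_mem_keys] at hc'
      simpa using hc'
    refine List.Nodup.append h (List.nodup_singleton k) ?_
    intro a ha hb
    rw [List.mem_singleton] at hb
    exact hk (hb ▸ ha)

lemma accB_nodup_keys (dim : Int) (l : List ((Int × Int) × Int)) (acc : PySem.Dict Int Int)
    (h : acc.keys.Nodup) :
    (l.foldl (fun acc e =>
        if 0 ≤ e.1.1 ∧ e.1.1 ≤ dim ∧ 0 ≤ e.1.2 ∧ e.1.2 ≤ dim then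
          acc.insert (dim - e.1.1 + e.1.2) (acc.getD (dim - e.1.1 + e.1.2) 0 + e.2)
        else acc) acc).keys.Nodup := by
  induction l generalizing acc with
  | nil => exact h
  | cons e r ih =>
    simp only [List.foldl_cons]
    split_ifs with hc
    · exact ih _ (nodup_keys_insert' _ _ _ h)
    · exact ih _ h

-- a fold that conditionally inserts fresh, strictly increasing keys builds exactly the filterMap
lemma itemsFold (t : Int → Int) (c : Int → Prop) [DecidablePred c] (l : List Int) (hl : l.Nodup)
    (d : PySem.Dict Int Int) (hd : ∀ n ∈ l, d.contains n = false) :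
    (l.foldl (fun d n => if c n then d.insert n (t n) else d) d).items
      = d.items ++ l.filterMap (fun n => if c n then some (n, t n) else none) := by
  induction l generalizing d with
  | nil => simp
  | cons x xs ih =>
    rcases List.nodup_cons.mp hl with ⟨hx, hxs⟩
    simp only [List.foldl_cons, List.filterMap_cons]
    by_cases hc : c x
    · rw [if_pos hc, if_pos hc]
      have hd' : ∀ n ∈ xs, (d.insert x (t x)).contains n = false := by
        intro n hn
        rw [PySem.Dict.contains_insert, hd n (List.mem_cons_of_mem _ hn)]
        have hne : (n == x) = false := by
          simp only [beq_eq_false_iff_ne, ne_eq]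
          exact fun h => hx (h ▸ hn)
        rw [hne]
        rfl
      rw [ih hxs _ hd',
        PySem.Dict.items_insert_of_not_contains d (t x) (hd x (by simp))]
      simp
    · rw [if_neg hc, if_neg hc, ih hxs _ (fun n hn => hd n (List.mem_cons_of_mem _ hn))]

lemma filterMap_if (l : List Int) (c : Int → Prop) [DecidablePred c] (F : Int → Int × Int) :
    l.filterMap (fun n => if c n then some (F n) else none)
      = (l.filter (fun n => decide (c n))).map F := by
  induction l with
  | nil => rfl
  | cons x xs ih =>
    simp only [List.filterMap_cons, List.filter_cons]
    by_cases hc : c x <;> simp [hc, ih]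

lemma eq_of_pairwise_lt_of_mem (xs ys : List Int)
    (hx : xs.Pairwise (· < ·)) (hy : ys.Pairwise (· < ·))
    (hmem : ∀ n, n ∈ xs ↔ n ∈ ys) : xs = ys := by
  have hnx : xs.Nodup := hx.imp (fun h => ne_of_lt h)
  have hny : ys.Nodup := hy.imp (fun h => ne_of_lt h)
  have hperm : ys.Perm xs := (List.perm_ext_iff_of_nodup hny hnx).mpr (fun a => (hmem a).symm)
  have h1 := PySem.List.sorted_eq_of_perm_of_pairwise_lt xs xs (fun x => x) (List.Perm.refl xs) hx
  have h2 := PySem.List.sorted_eq_of_perm_of_pairwise_lt xs ys (fun x => x) hperm hy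
  rw [h1] at h2; exact h2

lemma hkS_ne_zero_exists (dim n : Int) (l : List ((Int × Int) × Int)) (h : hkS dim n l ≠ 0) :
    ∃ e ∈ l, (0 ≤ e.1.1 ∧ e.1.1 ≤ dim ∧ 0 ≤ e.1.2 ∧ e.1.2 ≤ dim) ∧ dim - e.1.1 + e.1.2 = n := by
  by_contra hno
  push_neg at hno
  apply h
  apply List.sum_eq_zero
  intro x hx
  rcases List.mem_map.mp hx with ⟨e, he, hex⟩
  rw [← hex, hkContrib, if_neg]
  intro hcond
  exact hno e he ⟨hcond.1, hcond.2.1, hcond.2.2.1, hcond.2.2.2.1⟩ hcond.2.2.2.2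

-- ===== VERDICT (by name: the statement is the Claim_ definition above) =====
theorem hochschild_cohomology_HKR_spec : Claim_equal_hochschild_cohomology_HKR := by
  intro hodge dim is_CY _ hpre
  have hcy : is_CY = true := hpre
  subst hcy
  show hochschild_cohomology_HKR hodge dim true = hochschild_cohomology_HKR_alt hodge dim true
  -- the dict both ports build from the argument, and its items list
  set l : List ((Int × Int) × Int) :=
    (PySem.Dict.ofList (hodge.map (fun e => ((e.1, e.2.1), e.2.2)))).items with hldef
  have hnd : (l.map (·.1)).Nodup := by
    have h := PySem.Dict.nodup_keys_ofList (hodge.map (fun e => ((e.1, e.2.1), e.2.2)))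
    exact h
  -- ===== A side =====
  have hA : hochschild_cohomology_HKR hodge dim true
      = (PySem.List.pyRange 0 (2 * dim + 1) 1).filterMap
          (fun n => if 0 < hkS dim n l then some (n, hkS dim n l) else none) := by
    have h1 : hochschild_cohomology_HKR hodge dim true
        = ((PySem.List.pyRange 0 (2 * dim + 1) 1).foldl
            (fun hh n =>
              if ((PySem.List.pyRange 0 (dim + 1) 1).foldl (fun total p =>
                  if n - p < 0 ∨ n - p > dim then total
                  else total + (PySem.Dict.mk l).getD (dim - p, n - p) 0) 0) > 0
              then hh.insert n ((PySem.List.pyRange 0 (dim + 1) 1).foldl (fun total p =>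
                  if n - p < 0 ∨ n - p > dim then total
                  else total + (PySem.Dict.mk l).getD (dim - p, n - p) 0) 0)
              else hh) PySem.Dict.empty).items := rfl
    rw [h1, itemsFold
        (fun n => (PySem.List.pyRange 0 (dim + 1) 1).foldl (fun total p =>
            if n - p < 0 ∨ n - p > dim then total
            else total + (PySem.Dict.mk l).getD (dim - p, n - p) 0) 0)
        (fun n => ((PySem.List.pyRange 0 (dim + 1) 1).foldl (fun total p =>
            if n - p < 0 ∨ n - p > dim then total
            else total + (PySem.Dict.mk l).getD (dim - p, n - p) 0) 0) > 0)
        _ (PySem.List.nodup_pyRange_one 0 (2 * dim + 1))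
        PySem.Dict.empty (fun n _ => PySem.Dict.contains_empty n),
      show (PySem.Dict.empty : PySem.Dict Int Int).items = [] from rfl, List.nil_append]
    refine List.filterMap_congr ?_
    intro n _
    have hFA : (PySem.List.pyRange 0 (dim + 1) 1).foldl (fun total p =>
          if n - p < 0 ∨ n - p > dim then total
          else total + (PySem.Dict.mk l).getD (dim - p, n - p) 0) 0 = hkS dim n l := by
      calc (PySem.List.pyRange 0 (dim + 1) 1).foldl (fun total p =>
              if n - p < 0 ∨ n - p > dim then total
              else total + (PySem.Dict.mk l).getD (dim - p, n - p) 0) 0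
          = 0 + ((PySem.List.pyRange 0 (dim + 1) 1).map
              (fun p => if n - p < 0 ∨ n - p > dim then 0
                else (PySem.Dict.mk l).getD (dim - p, n - p) 0)).sum :=
            foldl_if_add (PySem.List.pyRange 0 (dim + 1) 1)
              (fun p => n - p < 0 ∨ n - p > dim)
              (fun p => (PySem.Dict.mk l).getD (dim - p, n - p) 0) 0
        _ = hkS dim n l := by rw [zero_add]; exact innerA dim n l hnd
    rw [hFA]
  -- ===== B side =====
  have hgacc : ∀ n, (l.foldl (fun acc e =>
      if 0 ≤ e.1.1 ∧ e.1.1 ≤ dim ∧ 0 ≤ e.1.2 ∧ e.1.2 ≤ dim then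
        acc.insert (dim - e.1.1 + e.1.2) (acc.getD (dim - e.1.1 + e.1.2) 0 + e.2)
      else acc) PySem.Dict.empty).getD n 0 = hkS dim n l := by
    intro n
    have h := accB_getD dim l PySem.Dict.empty n
    rwa [PySem.Dict.getD_empty, zero_add] at h
  have hmemkeys : ∀ n, n ∈ (l.foldl (fun acc e =>
      if 0 ≤ e.1.1 ∧ e.1.1 ≤ dim ∧ 0 ≤ e.1.2 ∧ e.1.2 ≤ dim then
        acc.insert (dim - e.1.1 + e.1.2) (acc.getD (dim - e.1.1 + e.1.2) 0 + e.2)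
      else acc) PySem.Dict.empty).keys
      ↔ ∃ e ∈ l, (0 ≤ e.1.1 ∧ e.1.1 ≤ dim ∧ 0 ≤ e.1.2 ∧ e.1.2 ≤ dim)
          ∧ dim - e.1.1 + e.1.2 = n := by
    intro n
    have h := accB_mem_keys dim l PySem.Dict.empty n
    rw [PySem.Dict.keys_empty] at h
    simpa using h
  have hnodupacc : (l.foldl (fun acc e =>
      if 0 ≤ e.1.1 ∧ e.1.1 ≤ dim ∧ 0 ≤ e.1.2 ∧ e.1.2 ≤ dim then
        acc.insert (dim - e.1.1 + e.1.2) (acc.getD (dim - e.1.1 + e.1.2) 0 + e.2)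
      else acc) PySem.Dict.empty).keys.Nodup :=
    accB_nodup_keys dim l PySem.Dict.empty
      (by rw [PySem.Dict.keys_empty]; exact List.nodup_nil)
  set acc : PySem.Dict Int Int := l.foldl (fun acc e =>
      if 0 ≤ e.1.1 ∧ e.1.1 ≤ dim ∧ 0 ≤ e.1.2 ∧ e.1.2 ≤ dim then
        acc.insert (dim - e.1.1 + e.1.2) (acc.getD (dim - e.1.1 + e.1.2) 0 + e.2)
      else acc) PySem.Dict.empty with haccdef
  have hB : hochschild_cohomology_HKR_alt hodge dim true
      = (PySem.List.sorted acc.keys (fun x => x)).filterMap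
          (fun n => if 0 < hkS dim n l then some (n, hkS dim n l) else none) := by
    have h1 : hochschild_cohomology_HKR_alt hodge dim true
        = ((PySem.List.sorted acc.keys (fun x => x)).foldl
            (fun out n => if acc.getD n 0 > 0 then out.insert n (acc.getD n 0) else out)
            PySem.Dict.empty).items := rfl
    rw [h1, itemsFold (fun n => acc.getD n 0) (fun n => acc.getD n 0 > 0) _
        ((PySem.List.sorted_perm acc.keys (fun x => x) false).symm.nodup hnodupacc)
        PySem.Dict.empty (fun n _ => PySem.Dict.contains_empty n),
      show (PySem.Dict.empty : PySem.Dict Int Int).items = [] from rfl, List.nil_append]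
    refine List.filterMap_congr ?_
    intro n _
    rw [hgacc n]
  -- ===== both sides are the same strictly increasing filtered list =====
  rw [hA, hB,
    filterMap_if _ (fun n => 0 < hkS dim n l) (fun n => (n, hkS dim n l)),
    filterMap_if _ (fun n => 0 < hkS dim n l) (fun n => (n, hkS dim n l))]
  refine congrArg _ ?_
  apply eq_of_pairwise_lt_of_mem
  · exact (PySem.List.pairwise_lt_pyRange_one 0 (2 * dim + 1)).filter _
  · refine List.Pairwise.filter _ ?_
    have hle := PySem.List.sorted_pairwise acc.keys (fun x => x)
    have hnd2 : (PySem.List.sorted acc.keys (fun x => x)).Nodup :=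
      (PySem.List.sorted_perm acc.keys (fun x => x) false).symm.nodup hnodupacc
    exact (hle.and hnd2).imp (fun h => lt_of_le_of_ne h.1 h.2)
  · intro n
    simp only [List.mem_filter, decide_eq_true_eq]
    constructor
    · rintro ⟨_, hpos⟩
      refine ⟨?_, hpos⟩
      rw [PySem.List.mem_sorted]
      exact (hmemkeys n).mpr
        (hkS_ne_zero_exists dim n l (by omega))
    · rintro ⟨hmem, hpos⟩
      refine ⟨?_, hpos⟩
      rw [PySem.List.mem_sorted] at hmem
      rcases (hmemkeys n).mp hmem with ⟨e, _, hce, hke⟩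
      exact PySem.List.mem_pyRange_one.mpr (by omega)
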